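-- pv_equiv track=rewrite | github.com/davimeireles/advent_of_code2024 | day2/part_2.py | try_to_fix_line
-- ===== SOURCE A (Python) =====
-- def check_valid_line(line):
--     if (line[0] > line[1]):
--         for current, next in zip(line, line[1:]):
--             if (current > next and abs(current - next) <= 3):
--                 continue
--             else:
--                 return False
--     elif (line[0] < line[1]):
--         for current, next in zip(line, line[1:]):
--             if (current < next and abs(current - next) <= 3):
--                 continue
--             else:
--                 return False
--     else:
--         return False
--     return True
--
-- def try_to_fix_line(line):
--     def check_and_fix(line, index):
--         temp_line = line[:index] + line[index+1:]
--         return check_valid_line(temp_line)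
--
--     for i in range(len(line)):
--         if i > 0:
--             prev = line[i-1]
--         else:
--             prev = None
--
--         current = line[i]
--
--         if i < len(line) - 1:
--             next = line[i+1]
--         else:
--             next = None
--
--         if prev is not None and current is not None and next is not None:
--             if (prev < current < next or prev > current > next):
--                 continue
--             else:
--                 if check_and_fix(line, i-1):
--                     return True
--                 if check_and_fix(line, i):
--                     return True
--                 if check_and_fix(line, i+1):
--                     return True
--                 return False
--         elif prev is None:
--             if check_and_fix(line, i):
--                 return True
--         elif next is None:
--             if check_and_fix(line, i):
--                 return True
--     return False
-- ===== SOURCE B (Python) =====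
-- def check_valid_line(line):
--     if (line[0] > line[1]):
--         for current, next in zip(line, line[1:]):
--             if (current > next and abs(current - next) <= 3):
--                 continue
--             else:
--                 return False
--     elif (line[0] < line[1]):
--         for current, next in zip(line, line[1:]):
--             if (current < next and abs(current - next) <= 3):
--                 continue
--             else:
--                 return False
--     else:
--         return False
--     return True
--
-- def try_to_fix_line(line):
--     for i in range(len(line)):
--         if check_valid_line(line[:i] + line[i+1:]):
--             return True
--     return False
-- ===== Notes on version B (the rewrite author's own statement) =====
-- stated objective: simpler
-- what changed: replaces A's single-pass scan for a local monotonicity violation (with a three-candidate fix attempt at the first violation) by the plain exhaustive dampener: try removing every index and test the same validity predicate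
import Mathlib
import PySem

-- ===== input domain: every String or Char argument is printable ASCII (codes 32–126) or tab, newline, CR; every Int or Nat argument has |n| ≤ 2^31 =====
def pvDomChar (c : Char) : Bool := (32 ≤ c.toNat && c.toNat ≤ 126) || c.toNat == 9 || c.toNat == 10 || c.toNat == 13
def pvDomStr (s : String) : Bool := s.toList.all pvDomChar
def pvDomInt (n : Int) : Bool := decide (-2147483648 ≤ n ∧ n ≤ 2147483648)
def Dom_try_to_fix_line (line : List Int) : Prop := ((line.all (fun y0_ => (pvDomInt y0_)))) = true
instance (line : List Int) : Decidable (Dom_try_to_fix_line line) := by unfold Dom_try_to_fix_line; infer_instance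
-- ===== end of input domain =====

-- B replaces A's single local-violation scan by the plain exhaustive "remove each index and
-- re-test" dampener over the same validity predicate (objective: simpler; not faster).


-- ===== PORT A =====
-- check_valid_line: line[0]/line[1] raise IndexError on lists shorter than 2 (pyGet? = none there;
-- those calls are excluded by Pre_); zip(line, line[1:]) with early return False = List.all.
def pvCheckValid (line : List Int) : Bool :=
  match PySem.List.pyGet? line 0, PySem.List.pyGet? line 1 with
  | some a, some b =>
    if a > b then
      (line.zip (PySem.List.slice line (some 1) none)).all
        (fun p => decide (p.1 > p.2) && decide ((p.1 - p.2).natAbs ≤ 3))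
    else if a < b then
      (line.zip (PySem.List.slice line (some 1) none)).all
        (fun p => decide (p.1 < p.2) && decide ((p.1 - p.2).natAbs ≤ 3))
    else false
  | _, _ => false   -- unreachable under Pre_: Python raises IndexError here

def pvCheckAndFix (line : List Int) (index : Int) : Bool :=
  pvCheckValid (PySem.List.slice line none (some index) ++ PySem.List.slice line (some (index + 1)) none)

-- the main 'for i in range(len(line))' loop with its early returns; Python's 'elif prev is None' and
-- 'elif next is None' branches have identical bodies, transcribed as the single else-branch.
def pvGoA (line : List Int) (i : Nat) : Bool :=
  if _h : i < line.length then
    let current := line.getD i 0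
    if 0 < i ∧ i + 1 < line.length then
      let prev := line.getD (i - 1) 0
      let next := line.getD (i + 1) 0
      if (prev < current ∧ current < next) ∨ (prev > current ∧ current > next) then
        pvGoA line (i + 1)
      else
        pvCheckAndFix line ((i : Int) - 1) || pvCheckAndFix line (i : Int) ||
          pvCheckAndFix line ((i : Int) + 1)
    else
      if pvCheckAndFix line (i : Int) then true else pvGoA line (i + 1)
  else false
termination_by line.length - i

def try_to_fix_line (line : List Int) : Bool := pvGoA line 0

-- ===== PORT B =====
-- Source B's own copy of check_valid_line
def pvCheckValidB (line : List Int) : Bool :=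
  match PySem.List.pyGet? line 0, PySem.List.pyGet? line 1 with
  | some a, some b =>
    if a > b then
      (line.zip (PySem.List.slice line (some 1) none)).all
        (fun p => decide (p.1 > p.2) && decide ((p.1 - p.2).natAbs ≤ 3))
    else if a < b then
      (line.zip (PySem.List.slice line (some 1) none)).all
        (fun p => decide (p.1 < p.2) && decide ((p.1 - p.2).natAbs ≤ 3))
    else false
  | _, _ => false   -- unreachable under Pre_: Python raises IndexError here

def try_to_fix_line_alt (line : List Int) : Bool :=
  (PySem.List.pyRange 0 (line.length : Int) 1).any fun i =>
    pvCheckValidB (PySem.List.slice line none (some i) ++ PySem.List.slice line (some (i + 1)) none)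

-- ===== PRECONDITION & SPEC =====
-- Pre_ excludes exactly the lists of length 1 or 2, on which Python A (and B) raise IndexError
-- inside check_valid_line (line[0]/line[1] of a too-short temp line).
def Pre_try_to_fix_line (line : List Int) : Prop := line = [] ∨ 3 ≤ line.length
instance (line : List Int) : Decidable (Pre_try_to_fix_line line) := by
  unfold Pre_try_to_fix_line; infer_instance
def pvWitness_try_to_fix_line : List Int := [1, 2, 3]

def Spec_try_to_fix_line (line : List Int) (out : Bool) : Prop := out = try_to_fix_line_alt line
instance (line : List Int) (out : Bool) : Decidable (Spec_try_to_fix_line line out) := by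
  unfold Spec_try_to_fix_line; infer_instance

-- ===== CLAIM (what is proved, stated in full; the proofs are below) =====
def Claim_equal_try_to_fix_line : Prop := ∀ (line : List Int), Dom_try_to_fix_line line →
  Pre_try_to_fix_line line → Spec_try_to_fix_line line (try_to_fix_line line)

-- ===== LEMMAS AND PROOFS =====

-- adjacent-pair conditions, stated with getD (all indices used are in range)
def IncAll (l : List Int) : Prop :=
  ∀ k, k + 1 < l.length → l.getD k 0 < l.getD (k + 1) 0 ∧ l.getD (k + 1) 0 - l.getD k 0 ≤ 3
def DecAll (l : List Int) : Prop :=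
  ∀ k, k + 1 < l.length → l.getD (k + 1) 0 < l.getD k 0 ∧ l.getD k 0 - l.getD (k + 1) 0 ≤ 3
-- the local condition A's loop tests at interior index i
def Mono3 (l : List Int) (i : Nat) : Prop :=
  (l.getD (i - 1) 0 < l.getD i 0 ∧ l.getD i 0 < l.getD (i + 1) 0) ∨
  (l.getD (i - 1) 0 > l.getD i 0 ∧ l.getD i 0 > l.getD (i + 1) 0)

theorem zipall_iff (f : Int × Int → Bool) (l : List Int) :
    ((l.zip l.tail).all f = true) ↔
      ∀ k, k + 1 < l.length → f (l.getD k 0, l.getD (k + 1) 0) = true := by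
  induction l with
  | nil => simp
  | cons a t ih =>
    cases t with
    | nil => simp
    | cons b t' =>
      simp only [List.tail_cons, List.zip_cons_cons, List.all_cons, Bool.and_eq_true]
      rw [show (b::t').zip t' = (b::t').zip (b::t').tail from rfl, ih]
      constructor
      · rintro ⟨hab, h⟩ k hk
        cases k with
        | zero => simpa using hab
        | succ k =>
          have := h k (by simp at hk ⊢; omega)
          simpa using this
      · intro h
        refine ⟨by simpa using h 0 (by simp), fun k hk => ?_⟩
        have := h (k+1) (by simp at hk ⊢; omega)
        simpa using this

theorem valid_iff (l : List Int) :
    pvCheckValid l = true ↔ 2 ≤ l.length ∧ (IncAll l ∨ DecAll l) := by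
  match l with
  | [] => simp [pvCheckValid, PySem.List.pyGet?]
  | [a] =>
    simp [pvCheckValid, PySem.List.pyGet?, show PySem.List.pyIdx? 1 1 = none from by decide,
      show PySem.List.pyIdx? 1 0 = some 0 from by decide]
  | a :: b :: t =>
    have hga : PySem.List.pyGet? (a :: b :: t) 0 = some a := by simp [pysem]
    have hgb : PySem.List.pyGet? (a :: b :: t) 1 = some b := by simp [pysem]
    have hlen : 2 ≤ (a :: b :: t).length := by simp
    have h01 : (0:Nat) + 1 < (a :: b :: t).length := by simp
    have e0 : (a :: b :: t).getD 0 0 = a := rfl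
    have e1 : (a :: b :: t).getD 1 0 = b := rfl
    unfold pvCheckValid
    rw [hga, hgb]
    simp only [PySem.List.slice_from_one]
    by_cases hab : a > b
    · rw [if_pos hab, zipall_iff]
      constructor
      · intro h
        refine ⟨hlen, Or.inr fun k hk => ?_⟩
        have := h k hk
        simp only [Bool.and_eq_true, decide_eq_true_eq] at this
        omega
      · rintro ⟨-, h | h⟩ k hk
        · have h0 := h 0 h01
          rw [e0, e1] at h0
          omega
        · have := h k hk
          simp only [Bool.and_eq_true, decide_eq_true_eq]
          omega
    · rw [if_neg hab]
      by_cases hab2 : a < b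
      · rw [if_pos hab2, zipall_iff]
        constructor
        · intro h
          refine ⟨hlen, Or.inl fun k hk => ?_⟩
          have := h k hk
          simp only [Bool.and_eq_true, decide_eq_true_eq] at this
          omega
        · rintro ⟨-, h | h⟩ k hk
          · have := h k hk
            simp only [Bool.and_eq_true, decide_eq_true_eq]
            omega
          · have h0 := h 0 h01
            rw [e0, e1] at h0
            omega
      · rw [if_neg hab2]
        constructor
        · intro h; cases h
        · rintro ⟨-, h | h⟩ <;>
          · have h0 := h 0 h01
            rw [e0, e1] at h0
            exfalso; omega

theorem getD_eraseIdx (l : List Int) (j i : Nat) (h : i < (l.eraseIdx j).length) :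
    (l.eraseIdx j).getD i 0 = if i < j then l.getD i 0 else l.getD (i + 1) 0 := by
  rw [List.getD_eq_getElem _ _ h, List.getElem_eraseIdx]
  split
  · rw [List.getD_eq_getElem]
  · rw [List.getD_eq_getElem]

theorem badTriple (l : List Int) (m j : Nat) (hm1 : 1 ≤ m) (hm2 : m + 1 < l.length)
    (hnm : ¬ Mono3 l m) (hj : j < l.length) (h1 : j ≠ m - 1) (h2 : j ≠ m) (h3 : j ≠ m + 1) :
    pvCheckValid (l.eraseIdx j) = false := by
  have hlen : (l.eraseIdx j).length = l.length - 1 := by simp [List.length_eraseIdx, hj]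
  cases hv : pvCheckValid (l.eraseIdx j) with
  | false => rfl
  | true =>
    exfalso
    obtain ⟨-, hcase⟩ := (valid_iff _).mp hv
    unfold Mono3 at hnm
    by_cases hjm : j < m
    · have hj2 : j < m - 1 := by omega
      have hmm : 2 ≤ m := by omega
      have ha : (l.eraseIdx j).getD (m - 2) 0 = l.getD (m - 1) 0 := by
        rw [getD_eraseIdx l j (m - 2) (by omega), if_neg (by omega)]
        congr 1
        omega
      have hb : (l.eraseIdx j).getD (m - 2 + 1) 0 = l.getD m 0 := by
        rw [getD_eraseIdx l j (m - 2 + 1) (by omega), if_neg (by omega)]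
        congr 1
        omega
      have hc : (l.eraseIdx j).getD (m - 2 + 1 + 1) 0 = l.getD (m + 1) 0 := by
        rw [getD_eraseIdx l j (m - 2 + 1 + 1) (by omega), if_neg (by omega)]
        congr 1
        omega
      rcases hcase with hC | hC <;>
      · have s1 := hC (m - 2) (by omega)
        have s2 := hC (m - 2 + 1) (by omega)
        rw [ha, hb] at s1
        rw [hb, hc] at s2
        omega
    · have hj2 : m + 2 ≤ j := by omega
      have ha : (l.eraseIdx j).getD (m - 1) 0 = l.getD (m - 1) 0 := by
        rw [getD_eraseIdx l j (m - 1) (by omega), if_pos (by omega)]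
      have hb : (l.eraseIdx j).getD (m - 1 + 1) 0 = l.getD m 0 := by
        rw [getD_eraseIdx l j (m - 1 + 1) (by omega), if_pos (by omega)]
        congr 1
        omega
      have hc : (l.eraseIdx j).getD (m - 1 + 1 + 1) 0 = l.getD (m + 1) 0 := by
        rw [getD_eraseIdx l j (m - 1 + 1 + 1) (by omega), if_pos (by omega)]
        congr 1
        omega
      rcases hcase with hC | hC <;>
      · have s1 := hC (m - 1) (by omega)
        have s2 := hC (m - 1 + 1) (by omega)
        rw [ha, hb] at s1
        rw [hb, hc] at s2
        omega

theorem allFalse_inc (l : List Int) (h3 : 3 ≤ l.length)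
    (hinc : ∀ k, k + 1 < l.length → l.getD k 0 < l.getD (k + 1) 0)
    (h0 : pvCheckValid (l.eraseIdx 0) = false)
    (hlast : pvCheckValid (l.eraseIdx (l.length - 1)) = false) :
    ∀ j, j < l.length → pvCheckValid (l.eraseIdx j) = false := by
  have hlen0 : (l.eraseIdx 0).length = l.length - 1 := by
    simp
  have hnI : ¬ IncAll (l.eraseIdx 0) := by
    intro hC
    have := (valid_iff _).mpr ⟨by omega, Or.inl hC⟩
    rw [h0] at this
    cases this
  unfold IncAll at hnI
  push Not at hnI
  obtain ⟨p, hp, hfail⟩ := hnI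
  have ea : ∀ i, i < (l.eraseIdx 0).length → (l.eraseIdx 0).getD i 0 = l.getD (i + 1) 0 :=
    fun i hi => by rw [getD_eraseIdx l 0 i hi, if_neg (by omega)]
  rw [ea p (by omega), ea (p + 1) (by omega)] at hfail
  have hbig : l.getD (p + 1 + 1) 0 - l.getD (p + 1) 0 > 3 := by
    have hstrict := hinc (p + 1) (by omega)
    omega
  set k := p + 1
  intro j hj
  by_cases hj0 : j = 0
  · subst hj0; exact h0
  by_cases hjl : j = l.length - 1
  · subst hjl; exact hlast
  cases hv : pvCheckValid (l.eraseIdx j) with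
  | false => rfl
  | true =>
    exfalso
    obtain ⟨-, hC⟩ := (valid_iff _).mp hv
    have hlenj : (l.eraseIdx j).length = l.length - 1 := by
      simp [List.length_eraseIdx]
      omega
    rcases hC with hI | hD
    · by_cases h1 : j = k
      · have s := hI (k - 1) (by omega)
        rw [show k - 1 + 1 = k from by omega] at s
        rw [getD_eraseIdx l j (k - 1) (by omega), if_pos (by omega),
            getD_eraseIdx l j k (by omega), if_neg (by omega)] at s
        have := hinc (k - 1) (by omega)
        rw [show k - 1 + 1 = k from by omega] at this
        omega
      · by_cases h2 : j = k + 1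
        · have s := hI k (by omega)
          rw [getD_eraseIdx l j k (by omega), if_pos (by omega),
              getD_eraseIdx l j (k + 1) (by omega), if_neg (by omega)] at s
          have := hinc (k + 1) (by omega)
          omega
        · by_cases h4 : j < k
          · have s := hI (k - 1) (by omega)
            rw [show k - 1 + 1 = k from by omega] at s
            rw [getD_eraseIdx l j (k - 1) (by omega), if_neg (by omega),
                getD_eraseIdx l j k (by omega), if_neg (by omega)] at s
            rw [show k - 1 + 1 = k from by omega] at s
            omega
          · have s := hI k (by omega)
            rw [getD_eraseIdx l j k (by omega), if_pos (by omega),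
                getD_eraseIdx l j (k + 1) (by omega), if_pos (by omega)] at s
            omega
    · have s := hD 0 (by omega)
      rw [show (0:Nat) + 1 = 1 from rfl] at s
      rw [getD_eraseIdx l j 0 (by omega), if_pos (by omega),
          getD_eraseIdx l j 1 (by omega)] at s
      have i0 := hinc 0 (by omega)
      rw [show (0:Nat) + 1 = 1 from rfl] at i0
      by_cases hj1 : j = 1
      · rw [if_neg (by omega)] at s
        have i1 := hinc 1 (by omega)
        omega
      · rw [if_pos (by omega)] at s
        omega

theorem getD_map_neg (l : List Int) (i : Nat) (h : i < l.length) :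
    (l.map (fun x => -x)).getD i 0 = -(l.getD i 0) := by
  rw [List.getD_eq_getElem _ _ (by simpa using h), List.getD_eq_getElem _ _ h, List.getElem_map]

theorem valid_neg (l : List Int) :
    pvCheckValid (l.map (fun x => -x)) = pvCheckValid l := by
  rw [Bool.eq_iff_iff, valid_iff, valid_iff]
  constructor
  · rintro ⟨hl, hI | hD⟩
    · refine ⟨by simpa using hl, Or.inr fun k hk => ?_⟩
      have := hI k (by simpa using hk)
      rw [getD_map_neg l k (by simp at hl ⊢; omega),
          getD_map_neg l (k + 1) (by simp at hl ⊢; omega)] at this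
      omega
    · refine ⟨by simpa using hl, Or.inl fun k hk => ?_⟩
      have := hD k (by simpa using hk)
      rw [getD_map_neg l k (by simp at hl ⊢; omega),
          getD_map_neg l (k + 1) (by simp at hl ⊢; omega)] at this
      omega
  · rintro ⟨hl, hI | hD⟩
    · refine ⟨by simpa using hl, Or.inr fun k hk => ?_⟩
      have := hI k (by simpa using hk)
      rw [getD_map_neg l k (by simp at hk ⊢; omega),
          getD_map_neg l (k + 1) (by simp at hk ⊢; omega)]
      omega
    · refine ⟨by simpa using hl, Or.inl fun k hk => ?_⟩
      have := hD k (by simpa using hk)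
      rw [getD_map_neg l k (by simp at hk ⊢; omega),
          getD_map_neg l (k + 1) (by simp at hk ⊢; omega)]
      omega

theorem allFalse (l : List Int) (h3 : 3 ≤ l.length)
    (hmono : ∀ k, 1 ≤ k → k + 1 < l.length → Mono3 l k)
    (h0 : pvCheckValid (l.eraseIdx 0) = false)
    (hlast : pvCheckValid (l.eraseIdx (l.length - 1)) = false) :
    ∀ j, j < l.length → pvCheckValid (l.eraseIdx j) = false := by
  have hm1 := hmono 1 le_rfl (by omega)
  unfold Mono3 at hm1
  norm_num at hm1
  rcases hm1 with h | h
  · have hinc : ∀ k, k + 1 < l.length → l.getD k 0 < l.getD (k + 1) 0 := by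
      intro k
      induction k with
      | zero => intro _; simpa using h.1
      | succ n ih =>
        intro hb
        have hprev := ih (by omega)
        have hmn := hmono (n + 1) (by omega) (by omega)
        unfold Mono3 at hmn
        rw [Nat.add_sub_cancel] at hmn
        rcases hmn with hh | hh
        · exact hh.2
        · exfalso; omega
    exact allFalse_inc l h3 hinc h0 hlast
  · have hdec : ∀ k, k + 1 < l.length → l.getD (k + 1) 0 < l.getD k 0 := by
      intro k
      induction k with
      | zero => intro _; simpa using h.1
      | succ n ih =>
        intro hb
        have hprev := ih (by omega)
        have hmn := hmono (n + 1) (by omega) (by omega)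
        unfold Mono3 at hmn
        rw [Nat.add_sub_cancel] at hmn
        rcases hmn with hh | hh
        · exfalso; omega
        · exact hh.2
    have hinc' : ∀ k, k + 1 < (l.map (fun x => -x)).length →
        (l.map (fun x => -x)).getD k 0 < (l.map (fun x => -x)).getD (k + 1) 0 := by
      intro k hk
      simp only [List.length_map] at hk
      rw [getD_map_neg l k (by omega), getD_map_neg l (k + 1) (by omega)]
      have := hdec k hk
      omega
    have h0' : pvCheckValid ((l.map (fun x => -x)).eraseIdx 0) = false := by
      rw [List.eraseIdx_map, valid_neg]; exact h0
    have hlast' : pvCheckValid ((l.map (fun x => -x)).eraseIdx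
        ((l.map (fun x => -x)).length - 1)) = false := by
      rw [List.eraseIdx_map, valid_neg, List.length_map]; exact hlast
    have hall' := allFalse_inc (l.map (fun x => -x)) (by simpa using h3) hinc' h0' hlast'
    intro j hj
    have hres := hall' j (by simpa using hj)
    rw [List.eraseIdx_map, valid_neg] at hres
    exact hres
theorem validB_eq (l : List Int) : pvCheckValidB l = pvCheckValid l := rfl

theorem cAF_eq (l : List Int) (j : Nat) :
    pvCheckAndFix l (j : Int) = pvCheckValid (l.eraseIdx j) := by
  unfold pvCheckAndFix
  rw [PySem.List.slice_to_natCast]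
  rw [show ((j : Int) + 1) = ((j + 1 : Nat) : Int) from by push_cast; ring]
  rw [PySem.List.slice_from_natCast, List.eraseIdx_eq_take_drop_succ]

theorem goA_true (l : List Int) :
    ∀ d i, l.length - i ≤ d → pvGoA l i = true →
      ∃ j, j < l.length ∧ pvCheckValid (l.eraseIdx j) = true := by
  intro d
  induction d with
  | zero =>
    intro i hle h
    rw [pvGoA, dif_neg (by omega)] at h
    cases h
  | succ n ih =>
    intro i hle h
    rw [pvGoA] at h
    by_cases hi : i < l.length
    · rw [dif_pos hi] at h
      simp only [] at h
      by_cases hint : 0 < i ∧ i + 1 < l.length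
      · rw [if_pos hint] at h
        split_ifs at h with hm
        · exact ih (i + 1) (by omega) h
        · simp only [Bool.or_eq_true] at h
          rw [show ((i : Int) - 1) = ((i - 1 : Nat) : Int) from by omega,
              show ((i : Int) + 1) = ((i + 1 : Nat) : Int) from by push_cast; ring,
              cAF_eq, cAF_eq, cAF_eq] at h
          rcases h with (h | h) | h
          · exact ⟨i - 1, by omega, h⟩
          · exact ⟨i, by omega, h⟩
          · exact ⟨i + 1, by omega, h⟩
      · rw [if_neg hint] at h
        split_ifs at h with hc
        · rw [cAF_eq] at hc
          exact ⟨i, hi, hc⟩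
        · exact ih (i + 1) (by omega) h
    · rw [dif_neg hi] at h
      cases h

theorem goA_false (l : List Int) (h3 : 3 ≤ l.length)
    (h0 : pvCheckValid (l.eraseIdx 0) = false) :
    ∀ d i, l.length - i ≤ d → 1 ≤ i → i < l.length → pvGoA l i = false →
    (∀ k, 1 ≤ k → k < i → Mono3 l k) →
    ∀ j, j < l.length → pvCheckValid (l.eraseIdx j) = false := by
  intro d
  induction d with
  | zero => intro i hle h1 h2; omega
  | succ n ih =>
    intro i hle h1 h2 h hpre
    rw [pvGoA, dif_pos h2] at h
    simp only [] at h
    by_cases hint : 0 < i ∧ i + 1 < l.length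
    · rw [if_pos hint] at h
      split_ifs at h with hm
      · exact ih (i + 1) (by omega) (by omega) (by omega) h
          (fun k hk1 hk2 => by
            rcases Nat.lt_or_ge k i with hlt | hge
            · exact hpre k hk1 hlt
            · have : k = i := by omega
              subst this
              exact hm)
      · simp only [Bool.or_eq_false_iff] at h
        rw [show ((i : Int) - 1) = ((i - 1 : Nat) : Int) from by omega,
            show ((i : Int) + 1) = ((i + 1 : Nat) : Int) from by push_cast; ring,
            cAF_eq, cAF_eq, cAF_eq] at h
        obtain ⟨⟨ha, hb⟩, hc⟩ := h
        intro j hj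
        by_cases e1 : j = i - 1
        · subst e1; exact ha
        by_cases e2 : j = i
        · subst e2; exact hb
        by_cases e3 : j = i + 1
        · subst e3; exact hc
        · exact badTriple l i j (by omega) (by omega) hm hj e1 e2 e3
    · have hieq : i = l.length - 1 := by omega
      rw [if_neg hint] at h
      split_ifs at h with hc
      have hcf : pvCheckValid (l.eraseIdx i) = false := by
        rw [← cAF_eq]
        simpa using hc
      refine allFalse l h3 (fun k hk1 hk2 => hpre k hk1 (by omega)) h0 ?_
      rw [← hieq]
      exact hcf

theorem altB_iff (l : List Int) :
    try_to_fix_line_alt l = true ↔ ∃ j, j < l.length ∧ pvCheckValid (l.eraseIdx j) = true := by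
  unfold try_to_fix_line_alt
  rw [PySem.List.pyRange_one]
  simp only [List.any_map, List.any_eq_true, List.mem_range, Function.comp, Int.sub_zero,
    Int.toNat_natCast, zero_add, validB_eq]
  constructor
  · rintro ⟨k, hk, hv⟩
    refine ⟨k, hk, ?_⟩
    rw [PySem.List.slice_to_natCast,
        show ((k : Int) + 1) = ((k + 1 : Nat) : Int) from by push_cast; ring,
        PySem.List.slice_from_natCast, ← List.eraseIdx_eq_take_drop_succ] at hv
    exact hv
  · rintro ⟨j, hj, hv⟩
    refine ⟨j, hj, ?_⟩
    rw [PySem.List.slice_to_natCast,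
        show ((j : Int) + 1) = ((j + 1 : Nat) : Int) from by push_cast; ring,
        PySem.List.slice_from_natCast, ← List.eraseIdx_eq_take_drop_succ]
    exact hv

-- ===== VERDICT (by name: the statement is the Claim_ definition above) =====
theorem try_to_fix_line_spec : Claim_equal_try_to_fix_line := by
  intro line _ hpre
  unfold Spec_try_to_fix_line
  rcases hpre with hnil | h3
  · subst hnil
    rw [show try_to_fix_line [] = false from by rw [try_to_fix_line, pvGoA, dif_neg (by simp)]]
    rw [show try_to_fix_line_alt [] = false from by
      unfold try_to_fix_line_alt
      rw [show (([] : List Int).length : Int) = 0 from rfl, PySem.List.pyRange_one]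
      simp]
  · cases hA : try_to_fix_line line with
    | true =>
      obtain ⟨j, hj, hv⟩ := goA_true line line.length 0 (by omega) hA
      exact ((altB_iff line).mpr ⟨j, hj, hv⟩).symm
    | false =>
      rw [try_to_fix_line, pvGoA, dif_pos (by omega)] at hA
      simp only [] at hA
      rw [if_neg (by omega)] at hA
      split_ifs at hA with hc
      have hc0 : pvCheckValid (line.eraseIdx 0) = false := by
        rw [← cAF_eq]
        simpa using hc
      have hall := goA_false line h3 hc0 line.length 1 (by omega) le_rfl (by omega) hA
        (fun k hk1 hk2 => absurd (Nat.lt_of_lt_of_le hk2 hk1) (lt_irrefl k))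
      cases hB : try_to_fix_line_alt line with
      | false => rfl
      | true =>
        exfalso
        obtain ⟨j, hj, hv⟩ := (altB_iff line).mp hB
        rw [hall j hj] at hv
        cases hv
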